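-- pv_equiv track=rewrite | github.com/jackywangno007-cyber/travel-agent-project | backend/app/agents/planner_agent.py | _build_target_counts
-- ===== SOURCE A (Python) =====
-- from typing import Any, Dict, List, Optional, Set
--
-- def _build_target_counts(day_count: int, attraction_count: int) -> List[int]:
--     if day_count <= 0:
--         return []
--
--     targets = [1] * day_count
--     remaining = max(attraction_count - day_count, 0)
--
--     for idx in range(day_count):
--         if remaining <= 0:
--             break
--         targets[idx] += 1
--         remaining -= 1
--
--     for idx in range(day_count):
--         if remaining <= 0:
--             break
--         if targets[idx] < 3:
--             targets[idx] += 1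
--             remaining -= 1
--
--     return targets
-- ===== SOURCE B (Python) =====
-- from typing import List
--
-- def _build_target_counts(day_count: int, attraction_count: int) -> List[int]:
--     if day_count <= 0:
--         return []
--     remaining = max(attraction_count - day_count, 0)
--     a = min(day_count, remaining)
--     b = min(day_count, max(remaining - day_count, 0))
--     return [1 + (i < a) + (i < b) for i in range(day_count)]
-- ===== Notes on version B (the rewrite author's own statement) =====
-- stated objective: simpler
-- what changed: Replaces the mutable targets list and the two sequential fill loops by closed-form thresholds a and b and a single comprehension 1+(i<a)+(i<b); the per-day cap of 3 follows from b<=a.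
import Mathlib
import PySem

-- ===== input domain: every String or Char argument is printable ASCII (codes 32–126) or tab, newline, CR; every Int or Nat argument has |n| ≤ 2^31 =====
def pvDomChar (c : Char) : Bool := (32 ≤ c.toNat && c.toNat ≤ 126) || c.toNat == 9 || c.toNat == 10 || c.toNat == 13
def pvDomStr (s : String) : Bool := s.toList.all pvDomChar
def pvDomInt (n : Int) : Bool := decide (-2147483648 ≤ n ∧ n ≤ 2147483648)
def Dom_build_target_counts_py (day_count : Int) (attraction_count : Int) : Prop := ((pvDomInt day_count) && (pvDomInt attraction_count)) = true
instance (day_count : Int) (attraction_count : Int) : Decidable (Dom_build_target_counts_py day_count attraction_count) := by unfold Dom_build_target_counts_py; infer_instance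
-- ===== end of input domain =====

-- B replaces A's mutable targets list and two sequential fill loops by closed-form
-- thresholds a, b and a single comprehension 1+(i<a)+(i<b) (objective: simpler).

-- ===== PORT A =====
-- first loop: 'for idx in range(day_count): if remaining <= 0: break; targets[idx] += 1; remaining -= 1'
def pvLoopA1 : List Int → Int → List Nat → List Int × Int
  | t, r, [] => (t, r)
  | t, r, i :: rest =>
    if r ≤ 0 then (t, r)
    else pvLoopA1 (t.set i (t.getD i 0 + 1)) (r - 1) rest

-- second loop: same, but increments only where targets[idx] < 3
def pvLoopA2 : List Int → Int → List Nat → List Int × Int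
  | t, r, [] => (t, r)
  | t, r, i :: rest =>
    if r ≤ 0 then (t, r)
    else if t.getD i 0 < 3 then pvLoopA2 (t.set i (t.getD i 0 + 1)) (r - 1) rest
    else pvLoopA2 t r rest

def build_target_counts_py (day_count : Int) (attraction_count : Int) : List Int :=
  if day_count ≤ 0 then []
  else
    let targets := List.replicate day_count.toNat 1
    let remaining := max (attraction_count - day_count) 0
    let s1 := pvLoopA1 targets remaining (List.range day_count.toNat)
    (pvLoopA2 s1.1 s1.2 (List.range day_count.toNat)).1

-- ===== PORT B =====
def build_target_counts_py_alt (day_count : Int) (attraction_count : Int) : List Int :=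
  if day_count ≤ 0 then []
  else
    let remaining := max (attraction_count - day_count) 0
    let a := min day_count remaining
    let b := min day_count (max (remaining - day_count) 0)
    (List.range day_count.toNat).map
      (fun (i : Nat) => 1 + (if (i : Int) < a then 1 else 0) + (if (i : Int) < b then 1 else 0))

-- ===== PRECONDITION & SPEC =====
def Spec_build_target_counts_py (day_count : Int) (attraction_count : Int) (out : List Int) : Prop := out = build_target_counts_py_alt day_count attraction_count
instance (day_count : Int) (attraction_count : Int) (out : List Int) : Decidable (Spec_build_target_counts_py day_count attraction_count out) := by unfold Spec_build_target_counts_py; infer_instance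

-- ===== CLAIM (what is proved, stated in full; the proofs are below) =====
def Claim_equal_build_target_counts_py : Prop := ∀ (day_count : Int) (attraction_count : Int), Dom_build_target_counts_py day_count attraction_count → Spec_build_target_counts_py day_count attraction_count (build_target_counts_py day_count attraction_count)

-- ===== LEMMAS AND PROOFS =====

theorem pvLoopA1_len (l : List Nat) (t : List Int) (r : Int) :
    (pvLoopA1 t r l).1.length = t.length := by
  induction l generalizing t r with
  | nil => rfl
  | cons i rest ih =>
    simp only [pvLoopA1]
    split
    · rfl
    · rw [ih]; simp

theorem pvLoopA2_len (l : List Nat) (t : List Int) (r : Int) :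
    (pvLoopA2 t r l).1.length = t.length := by
  induction l generalizing t r with
  | nil => rfl
  | cons i rest ih =>
    simp only [pvLoopA2]
    split
    · rfl
    · split
      · rw [ih]; simp
      · rw [ih]

theorem pvLoopA1_getD (k : Nat) : ∀ (j : Nat) (t : List Int) (r : Int),
    j + k ≤ t.length →
    ∀ i : Nat, (pvLoopA1 t r (List.range' j k)).1.getD i 0 =
      t.getD i 0 + (if (j : Int) ≤ i ∧ (i : Int) < (j : Int) + min (k : Int) r then 1 else 0) := by
  induction k with
  | zero =>
    intro j t r _ i
    simp only [List.range', pvLoopA1]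
    split_ifs <;> omega
  | succ k ih =>
    intro j t r hlen i
    rw [List.range'_succ]
    simp only [pvLoopA1]
    split
    · rename_i hr
      dsimp only
      split_ifs <;> omega
    · rename_i hr
      rw [ih (j + 1) _ (r - 1) (by simp; omega) i]
      by_cases hij : i = j
      · subst hij
        have hjlt : i < t.length := by omega
        have hset2 : (t.set i (t.getD i 0 + 1)).getD i 0 = t.getD i 0 + 1 := by
          simp [List.getD, List.getElem?_set, hjlt]
        rw [hset2]
        split_ifs <;> omega
      · have hset : (t.set j (t.getD j 0 + 1)).getD i 0 = t.getD i 0 := by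
          simp [List.getD, List.getElem?_set, Ne.symm hij]
        rw [hset]
        split_ifs <;> omega

theorem pvLoopA1_rem (k : Nat) : ∀ (t : List Int) (r : Int) (j : Nat),
    (pvLoopA1 t r (List.range' j k)).2 = r - min (k : Int) (max r 0) := by
  induction k with
  | zero => intro t r j; simp [List.range', pvLoopA1]
  | succ k ih =>
    intro t r j
    rw [List.range'_succ]
    simp only [pvLoopA1]
    split
    · rename_i hr; omega
    · rename_i hr
      rw [ih]
      omega

theorem pvLoopA2_getD (k : Nat) : ∀ (j : Nat) (t : List Int) (r : Int),
    j + k ≤ t.length →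
    (∀ m : Nat, j ≤ m → t.getD m 0 < 3) →
    ∀ i : Nat, (pvLoopA2 t r (List.range' j k)).1.getD i 0 =
      t.getD i 0 + (if (j : Int) ≤ i ∧ (i : Int) < (j : Int) + min (k : Int) r then 1 else 0) := by
  induction k with
  | zero =>
    intro j t r _ _ i
    simp only [List.range', pvLoopA2]
    split_ifs <;> omega
  | succ k ih =>
    intro j t r hlen h3 i
    rw [List.range'_succ]
    simp only [pvLoopA2]
    split
    · rename_i hr
      dsimp only
      split_ifs <;> omega
    · rename_i hr
      rw [if_pos (h3 j le_rfl)]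
      have h3' : ∀ m : Nat, j + 1 ≤ m → (t.set j (t.getD j 0 + 1)).getD m 0 < 3 := by
        intro m hm
        have hmj : m ≠ j := by omega
        have hset : (t.set j (t.getD j 0 + 1)).getD m 0 = t.getD m 0 := by
          simp [List.getD, List.getElem?_set, Ne.symm hmj]
        rw [hset]; exact h3 m (by omega)
      rw [ih (j + 1) _ (r - 1) (by simp; omega) h3' i]
      by_cases hij : i = j
      · subst hij
        have hjlt : i < t.length := by omega
        have hset2 : (t.set i (t.getD i 0 + 1)).getD i 0 = t.getD i 0 + 1 := by
          simp [List.getD, List.getElem?_set, hjlt]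
        rw [hset2]
        split_ifs <;> omega
      · have hset : (t.set j (t.getD j 0 + 1)).getD i 0 = t.getD i 0 := by
          simp [List.getD, List.getElem?_set, Ne.symm hij]
        rw [hset]
        split_ifs <;> omega

-- ===== VERDICT (by name: the statement is the Claim_ definition above) =====
theorem build_target_counts_py_spec : Claim_equal_build_target_counts_py := by
  intro dc ac _
  unfold Spec_build_target_counts_py build_target_counts_py build_target_counts_py_alt
  by_cases hdc : dc ≤ 0
  · simp [hdc]
  · simp only [if_neg hdc, List.range_eq_range']
    set n := dc.toNat with hn
    have hdn : (n : Int) = dc := Int.toNat_of_nonneg (by omega)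
    set r0 : Int := max (ac - dc) 0 with hr0
    have hr0n : 0 ≤ r0 := le_max_right _ _
    have hlen1 : (pvLoopA1 (List.replicate n 1) r0 (List.range' 0 n)).1.length = n := by
      rw [pvLoopA1_len]; simp
    have hget1 := pvLoopA1_getD n 0 (List.replicate n (1 : Int)) r0 (by simp)
    have hrem1 : (pvLoopA1 (List.replicate n 1) r0 (List.range' 0 n)).2 = r0 - min (n : Int) r0 := by
      rw [pvLoopA1_rem]
      have hm : max r0 0 = r0 := by omega
      rw [hm]
    have h3 : ∀ m : Nat, 0 ≤ m → (pvLoopA1 (List.replicate n 1) r0 (List.range' 0 n)).1.getD m 0 < 3 := by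
      intro m _
      rw [hget1 m]
      by_cases hm : m < n
      · rw [List.getD_eq_getElem _ _ (by simpa using hm)]
        simp only [List.getElem_replicate]
        split_ifs <;> omega
      · have hz : (List.replicate n (1 : Int)).getD m 0 = 0 :=
          List.getD_eq_default _ _ (by simpa using Nat.le_of_not_lt hm)
        rw [hz]
        split_ifs <;> omega
    apply List.ext_getElem
    · rw [pvLoopA2_len, hlen1]; simp
    · intro i h1 h2
      have hin : i < n := by rw [pvLoopA2_len, hlen1] at h1; exact h1
      have e1 : (pvLoopA2 (pvLoopA1 (List.replicate n 1) r0 (List.range' 0 n)).1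
          (pvLoopA1 (List.replicate n 1) r0 (List.range' 0 n)).2 (List.range' 0 n)).1[i] =
          (pvLoopA2 (pvLoopA1 (List.replicate n 1) r0 (List.range' 0 n)).1
          (pvLoopA1 (List.replicate n 1) r0 (List.range' 0 n)).2 (List.range' 0 n)).1.getD i 0 :=
        (List.getD_eq_getElem _ _ h1).symm
      rw [e1, hrem1, pvLoopA2_getD n 0 _ _ (by rw [hlen1]; omega) h3 i, hget1 i]
      have hrep : (List.replicate n (1 : Int)).getD i 0 = 1 := by
        rw [List.getD_eq_getElem _ _ (by simpa using hin)]
        simp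
      rw [hrep]
      simp only [List.getElem_map, List.getElem_range']
      split_ifs <;> omega
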